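-- pv_equiv track=rewrite | github.com/ngx-archive/nginx-extras-docs | generate.py | remove_md_sections
-- ===== SOURCE A (Python) =====
-- def remove_md_sections(md, titles):
--     out = []
--     # marks that we are "within" target section
--     section_level = None
--
--     for line in md.splitlines():
--         # remove that stuff:
--         # https://stackoverflow.com/questions/46154561/remove-zero-width-space-unicode-character-from-python-string/55400921
--         line = line.replace('\u200c', '')
--         line = line.replace('\ufeff', '')
--         if not line.startswith('#'):
--             # if not in target section, proceed adding stuff
--             if not section_level:
--                 out.append(line)
--             continue
--         # we are reading section title now
--         cur_sec_level = 0
--         cur_sec_title = ''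
--         seen_whitespace = False
--         for c in line:
--             if c == '#':
--                 cur_sec_level = cur_sec_level + 1
--             else:
--                 cur_sec_title = cur_sec_title + c
--         cur_sec_title = cur_sec_title.strip().rstrip(':')
--         if cur_sec_title.lower() in titles:
--             section_level = cur_sec_level
--             # do not add this target section title
--         elif section_level:
--             # already in target section
--             if cur_sec_level <= section_level:
--                 # found same/higher level with different title, unmark so we know we're out
--                 section_level = None
--                 out.append(line)
--             else:
--                 # level under target section, we skip
--                 pass
--         else:
--             # some other section
--             out.append(line)
--     return "\n".join(out)
-- ===== SOURCE B (Python) =====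
-- def remove_md_sections(md, titles):
--     # index-and-project: clean all lines once, extract header records, fold the
--     # header records alone into half-open deleted index regions, then keep the
--     # lines whose index lies in no region.
--     lines = [l.replace('\u200c', '').replace('\ufeff', '') for l in md.splitlines()]
--     headers = [(i, sum(c == '#' for c in l),
--                 ''.join(c for c in l if c != '#').strip().rstrip(':').lower())
--                for i, l in enumerate(lines) if l.startswith('#')]
--     regions = []
--     pending = None  # (start index, current level) of the open skip region
--     for i, lvl, title in headers:
--         if title in titles:
--             pending = (pending[0] if pending is not None else i, lvl)
--         elif pending is not None and lvl <= pending[1]: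
--             regions.append((pending[0], i))
--             pending = None
--     if pending is not None:
--         regions.append((pending[0], len(lines)))
--     kept = [l for i, l in enumerate(lines)
--             if not any(s <= i < e for s, e in regions)]
--     return "\n".join(kept)
-- ===== Notes on version B (the rewrite author's own statement) =====
-- stated objective: alternative
-- what changed: B replaces A's per-line state-flag fold with an index-and-project pass: it cleans all lines once, extracts only the header records (index, '#'-count, normalized title), folds just those records into half-open deleted index regions, and finally keeps the lines whose index lies in no region.
import Mathlib
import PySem

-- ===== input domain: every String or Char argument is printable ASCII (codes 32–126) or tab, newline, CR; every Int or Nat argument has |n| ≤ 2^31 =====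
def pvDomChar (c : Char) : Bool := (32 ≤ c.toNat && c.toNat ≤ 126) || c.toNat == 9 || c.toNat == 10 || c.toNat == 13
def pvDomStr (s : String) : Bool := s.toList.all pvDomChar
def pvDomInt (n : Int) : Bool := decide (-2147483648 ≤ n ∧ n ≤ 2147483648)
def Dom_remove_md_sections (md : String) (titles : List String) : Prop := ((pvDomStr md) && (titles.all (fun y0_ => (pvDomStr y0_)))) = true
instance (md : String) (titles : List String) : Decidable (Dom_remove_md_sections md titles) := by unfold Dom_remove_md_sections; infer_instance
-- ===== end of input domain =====

-- B removes the flagged markdown sections by indexing the header lines first and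
-- folding only those records into deleted index regions, instead of folding a
-- state flag over every line (objective: alternative decomposition, same cost).

-- ===== PORT A =====
-- shared by both ports (both Pythons contain the identical expressions):
-- line.replace('\u200c','').replace('\ufeff','')
def pvClean (l : List Char) : List Char :=
  PySem.Chars.replace (PySem.Chars.replace l [Char.ofNat 0x200c] []) [Char.ofNat 0xfeff] []

-- s.rstrip(':') ported by hand (PySem has no rstrip-with-chars): drop trailing ':' chars — exact
def pvRstripColon (cs : List Char) : List Char :=
  (cs.reverse.dropWhile (fun c => c == ':')).reverse

-- Python truthiness of section_level (None or an int)
def pvTruthy (o : Option Int) : Bool := o.getD 0 != 0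

-- the body of A's "for line in md.splitlines()" loop; state = (out, section_level)
def pvStepA (titles : List String) (st : List (List Char) × Option Int) (line0 : List Char) :
    List (List Char) × Option Int :=
  let line := pvClean line0
  if !(PySem.Chars.startswith line ['#']) then
    if !(pvTruthy st.2) then (st.1 ++ [line], st.2) else st
  else
    -- "for c in line": build (cur_sec_level, cur_sec_title) char by char
    let p := line.foldl (fun (q : Int × List Char) c =>
        if c == '#' then (q.1 + 1, q.2) else (q.1, q.2 ++ [c])) ((0 : Int), ([] : List Char))
    let curTitle := pvRstripColon (PySem.Chars.strip p.2)
    if titles.contains (String.ofList (PySem.Chars.lower curTitle)) then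
      (st.1, some p.1)
    else if pvTruthy st.2 then
      if p.1 ≤ st.2.getD 0 then (st.1 ++ [line], none) else st
    else
      (st.1 ++ [line], st.2)

def remove_md_sections (md : String) (titles : List String) : String :=
  let r := (PySem.Chars.splitlines md.toList).foldl (pvStepA titles) (([] : List (List Char)), (none : Option Int))
  String.ofList (PySem.Chars.join ['\n'] r.1)

-- ===== PORT B =====
-- header record of one cleaned line: (sum(c == '#' for c in l), normalized title)
def pvParseB (l : List Char) : Int × String :=
  ((l.map (fun c => if c == '#' then (1 : Int) else 0)).sum,
   String.ofList (PySem.Chars.lower (pvRstripColon (PySem.Chars.strip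
     (PySem.Chars.join [] ((l.filter (fun c => c != '#')).map (fun c => [c])))))))

-- the header-record list of B's comprehension, from start index b (the port uses b = 0)
def pvHdrs (ls : List (List Char)) (b : Int) : List (Int × Int × String) :=
  (PySem.List.enumerate ls b).filterMap
    (fun p => if PySem.Chars.startswith p.2 ['#'] then some (p.1, pvParseB p.2) else none)

-- one step of B's fold over header records; state = (regions, pending (start, level))
def pvRegStep (titles : List String) (acc : List (Int × Int) × Option (Int × Int))
    (h : Int × Int × String) : List (Int × Int) × Option (Int × Int) :=
  if titles.contains h.2.2 then
    match acc.2 with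
    | none => (acc.1, some (h.1, h.2.1))
    | some sl => (acc.1, some (sl.1, h.2.1))
  else
    match acc.2 with
    | some sl => if h.2.1 ≤ sl.2 then (acc.1 ++ [(sl.1, h.1)], none) else acc
    | none => acc

-- B's final keep-filter over (index, line) pairs, from start index b (the port uses b = 0)
def pvKept (ls : List (List Char)) (b : Int) (regions : List (Int × Int)) : List (List Char) :=
  (PySem.List.enumerate ls b).filterMap
    (fun p => if regions.any (fun r => decide (r.1 ≤ p.1) && decide (p.1 < r.2)) then none else some p.2)

def remove_md_sections_alt (md : String) (titles : List String) : String :=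
  let lines := (PySem.Chars.splitlines md.toList).map pvClean
  let acc := (pvHdrs lines 0).foldl (pvRegStep titles) (([] : List (Int × Int)), (none : Option (Int × Int)))
  let regions := match acc.2 with
    | some sl => acc.1 ++ [(sl.1, (lines.length : Int))]
    | none => acc.1
  String.ofList (PySem.Chars.join ['\n'] (pvKept lines 0 regions))


-- ===== PRECONDITION & SPEC =====
def Spec_remove_md_sections (md : String) (titles : List String) (out : String) : Prop := out = remove_md_sections_alt md titles
instance (md : String) (titles : List String) (out : String) : Decidable (Spec_remove_md_sections md titles out) := by unfold Spec_remove_md_sections; infer_instance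

-- ===== CLAIM (what is proved, stated in full; the proofs are below) =====
def Claim_equal_remove_md_sections : Prop := ∀ (md : String) (titles : List String), Dom_remove_md_sections md titles → Spec_remove_md_sections md titles (remove_md_sections md titles)

-- ===== LEMMAS AND PROOFS =====

def specRec (titles : List String) : List (List Char) → Option Int → List (List Char)
  | [], _ => []
  | l :: ls, st =>
    if !(PySem.Chars.startswith l ['#']) then
      if !(pvTruthy st) then l :: specRec titles ls st else specRec titles ls st
    else
      let q := pvParseB l
      if titles.contains q.2 then specRec titles ls (some q.1)
      else if pvTruthy st then
        if q.1 ≤ st.getD 0 then l :: specRec titles ls none else specRec titles ls st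
      else l :: specRec titles ls st

theorem parseA_fold (cs : List Char) (a : Int) (t : List Char) :
    cs.foldl (fun (q : Int × List Char) c =>
        if c == '#' then (q.1 + 1, q.2) else (q.1, q.2 ++ [c])) (a, t)
      = (a + (cs.countP (fun c => c == '#') : Int), t ++ cs.filter (fun c => c != '#')) := by
  induction cs generalizing a t with
  | nil => simp
  | cons c cs ih =>
    rw [List.foldl_cons]
    by_cases h : c = '#'
    · simp only [h, beq_self_eq_true, if_pos, ih, List.countP_cons, List.filter_cons]
      simp
      ring
    · have hb : (c == '#') = false := by simp [h]
      simp only [if_neg, Bool.false_eq_true, not_false_iff, ih, List.countP_cons, List.filter_cons, bne, hb]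
      simp

theorem parseB_eq (l : List Char) :
    pvParseB l = ((l.countP (fun c => c == '#') : Int),
      String.ofList (PySem.Chars.lower (pvRstripColon (PySem.Chars.strip (l.filter (fun c => c != '#')))))) := by
  unfold pvParseB
  rw [PySem.List.sum_map_ite_one_zero, PySem.Chars.join_nil_singletons]


theorem stepA_nh_keep (titles : List String) (out : List (List Char)) (st : Option Int) (l : List Char)
    (h : PySem.Chars.startswith (pvClean l) ['#'] = false) (h2 : pvTruthy st = false) :
    pvStepA titles (out, st) l = (out ++ [pvClean l], st) := by
  unfold pvStepA; simp [h, h2]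

theorem stepA_nh_skip (titles : List String) (out : List (List Char)) (st : Option Int) (l : List Char)
    (h : PySem.Chars.startswith (pvClean l) ['#'] = false) (h2 : pvTruthy st = true) :
    pvStepA titles (out, st) l = (out, st) := by
  unfold pvStepA; simp [h, h2]

theorem stepA_match (titles : List String) (out : List (List Char)) (st : Option Int) (l : List Char)
    (h : PySem.Chars.startswith (pvClean l) ['#'] = true)
    (h2 : titles.contains (pvParseB (pvClean l)).2 = true) :
    pvStepA titles (out, st) l = (out, some (pvParseB (pvClean l)).1) := by
  unfold pvStepA
  simp only [parseB_eq] at h2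
  have h2' := (List.contains_iff_mem).1 h2
  simp only [parseA_fold]
  simp [h, h2', parseB_eq]

theorem stepA_close (titles : List String) (out : List (List Char)) (st : Option Int) (l : List Char)
    (h : PySem.Chars.startswith (pvClean l) ['#'] = true)
    (h2 : titles.contains (pvParseB (pvClean l)).2 = false) (h3 : pvTruthy st = true)
    (h4 : (pvParseB (pvClean l)).1 ≤ st.getD 0) :
    pvStepA titles (out, st) l = (out ++ [pvClean l], none) := by
  unfold pvStepA
  simp only [parseB_eq] at h2 h4
  have h2' : ¬ (String.ofList (PySem.Chars.lower (pvRstripColon (PySem.Chars.strip (List.filter (fun c => c != '#') (pvClean l)))))) ∈ titles := by simpa using h2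
  simp only [parseA_fold]
  simp [h, h2', h3, h4, parseB_eq]

theorem stepA_deep (titles : List String) (out : List (List Char)) (st : Option Int) (l : List Char)
    (h : PySem.Chars.startswith (pvClean l) ['#'] = true)
    (h2 : titles.contains (pvParseB (pvClean l)).2 = false) (h3 : pvTruthy st = true)
    (h4 : ¬ (pvParseB (pvClean l)).1 ≤ st.getD 0) :
    pvStepA titles (out, st) l = (out, st) := by
  unfold pvStepA
  simp only [parseB_eq] at h2 h4
  have h2' : ¬ (String.ofList (PySem.Chars.lower (pvRstripColon (PySem.Chars.strip (List.filter (fun c => c != '#') (pvClean l)))))) ∈ titles := by simpa using h2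
  simp only [parseA_fold]
  simp [h, h2', h3, h4, parseB_eq]

theorem stepA_other (titles : List String) (out : List (List Char)) (st : Option Int) (l : List Char)
    (h : PySem.Chars.startswith (pvClean l) ['#'] = true)
    (h2 : titles.contains (pvParseB (pvClean l)).2 = false) (h3 : pvTruthy st = false) :
    pvStepA titles (out, st) l = (out ++ [pvClean l], st) := by
  unfold pvStepA
  simp only [parseB_eq] at h2
  have h2' : ¬ (String.ofList (PySem.Chars.lower (pvRstripColon (PySem.Chars.strip (List.filter (fun c => c != '#') (pvClean l)))))) ∈ titles := by simpa using h2
  simp only [parseA_fold]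
  simp [h, h2', h3]

theorem foldA_spec (titles : List String) (rawls : List (List Char))
    (out : List (List Char)) (st : Option Int) :
    (rawls.foldl (pvStepA titles) (out, st)).1 = out ++ specRec titles (rawls.map pvClean) st := by
  induction rawls generalizing out st with
  | nil => simp [specRec]
  | cons l ls ih =>
    rw [List.foldl_cons, List.map_cons, specRec]
    by_cases hH : PySem.Chars.startswith (pvClean l) ['#'] = true
    · by_cases hT : titles.contains (pvParseB (pvClean l)).2 = true
      · have hT' : (pvParseB (pvClean l)).2 ∈ titles := by simpa using hT
        rw [stepA_match titles out st l hH hT, ih]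
        simp [hH, hT']
      · rw [Bool.not_eq_true] at hT
        have hT' : (pvParseB (pvClean l)).2 ∉ titles := by simpa using hT
        by_cases hS : pvTruthy st = true
        · by_cases hle : (pvParseB (pvClean l)).1 ≤ st.getD 0
          · rw [stepA_close titles out st l hH hT hS hle, ih]
            simp [hH, hT', hS, hle]
          · rw [stepA_deep titles out st l hH hT hS hle, ih]
            simp [hH, hT', hS, hle]
        · rw [Bool.not_eq_true] at hS
          rw [stepA_other titles out st l hH hT hS, ih]
          simp [hH, hT', hS]
    · rw [Bool.not_eq_true] at hH
      by_cases hS : pvTruthy st = true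
      · rw [stepA_nh_skip titles out st l hH hS, ih]
        simp [hH, hS]
      · rw [Bool.not_eq_true] at hS
        rw [stepA_nh_keep titles out st l hH hS, ih]
        simp [hH, hS]

theorem parse_level_pos (l : List Char) (h : PySem.Chars.startswith l ['#'] = true) :
    1 ≤ (pvParseB l).1 := by
  rw [parseB_eq]
  rcases (PySem.Chars.startswith_iff l ['#']).1 h with ⟨t, rfl⟩
  simp

def regsFrom (titles : List String) (ls : List (List Char)) (b : Int) (p : Option (Int × Int)) :
    List (Int × Int) :=
  let a := (pvHdrs ls b).foldl (pvRegStep titles) (([] : List (Int × Int)), p)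
  match a.2 with
  | some sl => a.1 ++ [(sl.1, b + ls.length)]
  | none => a.1

theorem hdrs_cons (l : List Char) (ls : List (List Char)) (b : Int) :
    pvHdrs (l :: ls) b
      = (if PySem.Chars.startswith l ['#'] then [(b, pvParseB l)] else []) ++ pvHdrs ls (b + 1) := by
  unfold pvHdrs
  rw [PySem.List.enumerate_cons, List.filterMap_cons]
  by_cases h : PySem.Chars.startswith l ['#'] = true <;> simp [h]

theorem reg_acc (titles : List String) (hs : List (Int × Int × String))
    (rs : List (Int × Int)) (p : Option (Int × Int)) :
    hs.foldl (pvRegStep titles) (rs, p)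
      = (rs ++ (hs.foldl (pvRegStep titles) ([], p)).1, (hs.foldl (pvRegStep titles) ([], p)).2) := by
  induction hs generalizing rs p with
  | nil => simp
  | cons h hs ih =>
    rw [List.foldl_cons, List.foldl_cons]
    have step : ∀ rs' : List (Int × Int), pvRegStep titles (rs', p) h
        = (rs' ++ (pvRegStep titles ([], p) h).1, (pvRegStep titles ([], p) h).2) := by
      intro rs'
      unfold pvRegStep
      cases p with
      | none => split_ifs <;> simp
      | some sl =>
        by_cases h2 : h.2.1 ≤ sl.2 <;> split_ifs <;> simp [h2]
    rw [step rs, step ([] : List (Int × Int))]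
    simp only [List.nil_append]
    rw [ih ((pvRegStep titles ([], p) h).1), ih]
    simp

theorem regsFrom_nil (titles : List String) (b : Int) (p : Option (Int × Int)) :
    regsFrom titles [] b p = (match p with | some sl => [(sl.1, b)] | none => []) := by
  unfold regsFrom pvHdrs
  cases p <;> simp [PySem.List.enumerate]

theorem regsFrom_nh (titles : List String) (l : List Char) (ls : List (List Char)) (b : Int)
    (p : Option (Int × Int)) (h : PySem.Chars.startswith l ['#'] = false) :
    regsFrom titles (l :: ls) b p = regsFrom titles ls (b + 1) p := by
  unfold regsFrom
  rw [hdrs_cons]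
  simp [h, List.length_cons]
  rw [show b + ((ls.length : Int) + 1) = b + 1 + (ls.length : Int) from by ring]

theorem regsFrom_match (titles : List String) (l : List Char) (ls : List (List Char)) (b : Int)
    (p : Option (Int × Int)) (h : PySem.Chars.startswith l ['#'] = true)
    (hT : titles.contains (pvParseB l).2 = true) :
    regsFrom titles (l :: ls) b p
      = regsFrom titles ls (b + 1) (some (match p with | some sl => sl.1 | none => b, (pvParseB l).1)) := by
  unfold regsFrom
  rw [hdrs_cons]
  simp only [h, if_pos, List.cons_append, List.nil_append, List.foldl_cons]
  have step : pvRegStep titles ([], p) (b, pvParseB l)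
      = ([], some (match p with | some sl => sl.1 | none => b, (pvParseB l).1)) := by
    unfold pvRegStep
    have hT' : (pvParseB l).2 ∈ titles := by simpa using hT
    cases p <;> simp [hT']
  rw [step]
  simp [List.length_cons]
  rw [show b + ((ls.length : Int) + 1) = b + 1 + (ls.length : Int) from by ring]

theorem regsFrom_close (titles : List String) (l : List Char) (ls : List (List Char)) (b : Int)
    (sl : Int × Int) (h : PySem.Chars.startswith l ['#'] = true)
    (hT : titles.contains (pvParseB l).2 = false) (hle : (pvParseB l).1 ≤ sl.2) :
    regsFrom titles (l :: ls) b (some sl) = (sl.1, b) :: regsFrom titles ls (b + 1) none := by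
  unfold regsFrom
  rw [hdrs_cons]
  simp only [h, if_pos, List.cons_append, List.nil_append, List.foldl_cons]
  have hT' : ¬ (pvParseB l).2 ∈ titles := by simpa using hT
  have step : pvRegStep titles ([], some sl) (b, pvParseB l) = ([(sl.1, b)], none) := by
    unfold pvRegStep
    simp [hT', hle]
  rw [step, reg_acc]
  simp only [List.length_cons]
  rw [show b + (((ls.length + 1 : Nat)) : Int) = b + 1 + (ls.length : Int) from by push_cast; ring]
  cases hp : ((pvHdrs ls (b + 1)).foldl (pvRegStep titles) ([], none)).2 <;> simp

theorem regsFrom_skip (titles : List String) (l : List Char) (ls : List (List Char)) (b : Int)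
    (p : Option (Int × Int)) (h : PySem.Chars.startswith l ['#'] = true)
    (hT : titles.contains (pvParseB l).2 = false)
    (hd : ∀ sl, p = some sl → ¬ (pvParseB l).1 ≤ sl.2) :
    regsFrom titles (l :: ls) b p = regsFrom titles ls (b + 1) p := by
  unfold regsFrom
  rw [hdrs_cons]
  simp only [h, if_pos, List.cons_append, List.nil_append, List.foldl_cons]
  have hT' : ¬ (pvParseB l).2 ∈ titles := by simpa using hT
  have step : pvRegStep titles ([], p) (b, pvParseB l) = ([], p) := by
    unfold pvRegStep
    cases p with
    | none => simp [hT']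
    | some sl => simp [hT', hd sl rfl]
  rw [step]
  simp [List.length_cons]
  rw [show b + ((ls.length : Int) + 1) = b + 1 + (ls.length : Int) from by ring]


theorem regsFrom_shape (titles : List String) (ls : List (List Char)) (b : Int)
    (p : Option (Int × Int)) :
    (match p with
     | some sl => ∃ e rest, regsFrom titles ls b p = (sl.1, e) :: rest ∧ b ≤ e ∧ ∀ r ∈ rest, b < r.1
     | none => ∀ r ∈ regsFrom titles ls b p, b ≤ r.1) := by
  induction ls generalizing b p with
  | nil =>
    cases p with
    | none => simp [regsFrom_nil]
    | some sl => exact ⟨b, [], by simp [regsFrom_nil], le_refl b, by simp⟩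
  | cons l ls ih =>
    by_cases hH : PySem.Chars.startswith l ['#'] = true
    · by_cases hT : titles.contains (pvParseB l).2 = true
      · rw [regsFrom_match titles l ls b p hH hT]
        cases p with
        | none =>
          have := ih (b + 1) (some (b, (pvParseB l).1))
          simp only at this
          obtain ⟨e, rest, he, hbe, hrest⟩ := this
          intro r hr
          rw [he] at hr
          rcases List.mem_cons.1 hr with h1 | h1
          · subst h1; exact le_refl b
          · exact le_of_lt (lt_of_le_of_lt (by omega) (hrest r h1))
        | some sl =>
          have := ih (b + 1) (some (sl.1, (pvParseB l).1))
          simp only at this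
          obtain ⟨e, rest, he, hbe, hrest⟩ := this
          exact ⟨e, rest, he, by omega, fun r hr => by have := hrest r hr; omega⟩
      · rw [Bool.not_eq_true] at hT
        cases p with
        | none =>
          rw [regsFrom_skip titles l ls b none hH hT (by intro sl h; cases h)]
          have := ih (b + 1) (none : Option (Int × Int))
          simp only at this
          intro r hr
          have := this r hr
          omega
        | some sl =>
          by_cases hle : (pvParseB l).1 ≤ sl.2
          · rw [regsFrom_close titles l ls b sl hH hT hle]
            refine ⟨b, regsFrom titles ls (b + 1) none, rfl, le_refl b, ?_⟩
            intro r hr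
            have := ih (b + 1) (none : Option (Int × Int))
            simp only at this
            have := this r hr
            omega
          · rw [regsFrom_skip titles l ls b (some sl) hH hT (by intro sl' h; cases h; exact hle)]
            have := ih (b + 1) (some sl)
            simp only at this
            obtain ⟨e, rest, he, hbe, hrest⟩ := this
            exact ⟨e, rest, he, by omega, fun r hr => by have := hrest r hr; omega⟩
    · rw [Bool.not_eq_true] at hH
      rw [regsFrom_nh titles l ls b p hH]
      cases p with
      | none =>
        have := ih (b + 1) (none : Option (Int × Int))
        simp only at this
        intro r hr
        have := this r hr
        omega
      | some sl =>
        have := ih (b + 1) (some sl)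
        simp only at this
        obtain ⟨e, rest, he, hbe, hrest⟩ := this
        exact ⟨e, rest, he, by omega, fun r hr => by have := hrest r hr; omega⟩

def inReg (R : List (Int × Int)) (i : Int) : Bool :=
  R.any (fun r => decide (r.1 ≤ i) && decide (i < r.2))

theorem kept_cons (l : List Char) (ls : List (List Char)) (b : Int) (R : List (Int × Int)) :
    pvKept (l :: ls) b R = (if inReg R b then [] else [l]) ++ pvKept ls (b + 1) R := by
  unfold pvKept inReg
  rw [PySem.List.enumerate_cons, List.filterMap_cons]
  by_cases h : R.any (fun r => decide (r.1 ≤ b) && decide (b < r.2)) = true <;> simp [h]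

theorem kept_drop_dead (ls : List (List Char)) (b : Int) (r : Int × Int)
    (R : List (Int × Int)) (h : r.2 ≤ b) :
    pvKept ls b (r :: R) = pvKept ls b R := by
  induction ls generalizing b with
  | nil => simp [pvKept, PySem.List.enumerate]
  | cons l ls ih =>
    rw [kept_cons, kept_cons]
    have hh : inReg (r :: R) b = inReg R b := by
      unfold inReg
      simp only [List.any_cons]
      have : decide (b < r.2) = false := by simp; omega
      simp [this]
    rw [hh, ih (b + 1) (by omega)]

theorem inReg_true_of_head (R : List (Int × Int)) (s e i : Int) (h1 : s ≤ i) (h2 : i < e) :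
    inReg ((s, e) :: R) i = true := by
  unfold inReg
  simp only [List.any_cons]
  simp [h1, h2]

theorem inReg_false_of_late (R : List (Int × Int)) (i : Int) (h : ∀ r ∈ R, i < r.1) :
    inReg R i = false := by
  unfold inReg
  rw [List.any_eq_false]
  intro r hr
  have := h r hr
  simp
  omega

theorem kept_spec (titles : List String) (ls : List (List Char)) (b : Int)
    (p : Option (Int × Int))
    (hp : ∀ sl, p = some sl → sl.1 ≤ b ∧ 1 ≤ sl.2) :
    pvKept ls b (regsFrom titles ls b p) = specRec titles ls (p.map (·.2)) := by
  induction ls generalizing b p with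
  | nil => cases p <;> simp [pvKept, PySem.List.enumerate, specRec]
  | cons l ls ih =>
    rw [specRec]
    by_cases hH : PySem.Chars.startswith l ['#'] = true
    · by_cases hT : titles.contains (pvParseB l).2 = true
      · -- matching header: line deleted, pending (re)opened
        have hT' : (pvParseB l).2 ∈ titles := by simpa using hT
        have hlvl : 1 ≤ (pvParseB l).1 := parse_level_pos l hH
        rw [regsFrom_match titles l ls b p hH hT]
        cases p with
        | none =>
          have shape := regsFrom_shape titles ls (b + 1) (some (b, (pvParseB l).1))
          simp only at shape
          obtain ⟨e, rest, he, hbe, hrest⟩ := shape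
          rw [kept_cons]
          simp only [] at he ⊢
          rw [he]
          have hin : inReg ((b, e) :: rest) b = true := inReg_true_of_head rest b e b (le_refl b) (by omega)
          rw [hin, ← he, ih (b + 1) (some (b, (pvParseB l).1)) (by intro sl hsl; cases hsl; exact ⟨by omega, hlvl⟩)]
          simp [hH, hT']
        | some sl =>
          have shape := regsFrom_shape titles ls (b + 1) (some (sl.1, (pvParseB l).1))
          simp only at shape
          obtain ⟨e, rest, he, hbe, hrest⟩ := shape
          rw [kept_cons]
          simp only [] at he ⊢
          rw [he]
          have hin : inReg ((sl.1, e) :: rest) b = true :=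
            inReg_true_of_head rest sl.1 e b (hp sl rfl).1 (by omega)
          rw [hin, ← he, ih (b + 1) (some (sl.1, (pvParseB l).1)) (by intro sl' hsl; cases hsl; exact ⟨(hp sl rfl).1.trans (by omega), hlvl⟩)]
          simp [hH, hT']
      · rw [Bool.not_eq_true] at hT
        have hT' : ¬ (pvParseB l).2 ∈ titles := by simpa using hT
        cases p with
        | none =>
          -- other header outside any section: kept
          rw [regsFrom_skip titles l ls b none hH hT (by intro sl h; cases h)]
          have shape := regsFrom_shape titles ls (b + 1) (none : Option (Int × Int))
          simp only at shape
          rw [kept_cons]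
          have hin : inReg (regsFrom titles ls (b + 1) none) b = false :=
            inReg_false_of_late _ b (fun r hr => by have := shape r hr; omega)
          rw [hin, ih (b + 1) (none : Option (Int × Int)) (by intro sl h; cases h)]
          simp [hH, hT', pvTruthy]
        | some sl =>
          by_cases hle : (pvParseB l).1 ≤ sl.2
          · -- closing header: kept, region ends here
            rw [regsFrom_close titles l ls b sl hH hT hle]
            have shape := regsFrom_shape titles ls (b + 1) (none : Option (Int × Int))
            simp only at shape
            rw [kept_cons]
            have hin : inReg ((sl.1, b) :: regsFrom titles ls (b + 1) none) b = false := by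
              unfold inReg
              simp only [List.any_cons]
              have h1 : decide (b < b) = false := by simp
              have h2 : inReg (regsFrom titles ls (b + 1) none) b = false :=
                inReg_false_of_late _ b (fun r hr => by have := shape r hr; omega)
              unfold inReg at h2
              simp [h2]
            rw [hin, kept_drop_dead ls (b + 1) (sl.1, b) _ (by omega),
              ih (b + 1) (none : Option (Int × Int)) (by intro sl' h; cases h)]
            have htr : pvTruthy (some sl.2) = true := by
              have := (hp sl rfl).2
              simp [pvTruthy]; omega
            simp [hH, hT', htr, hle]
          · -- deeper header inside the section: deleted
            rw [regsFrom_skip titles l ls b (some sl) hH hT (by intro sl' h; cases h; exact hle)]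
            have shape := regsFrom_shape titles ls (b + 1) (some sl)
            simp only at shape
            obtain ⟨e, rest, he, hbe, hrest⟩ := shape
            rw [kept_cons, he]
            have hin : inReg ((sl.1, e) :: rest) b = true :=
              inReg_true_of_head rest sl.1 e b (hp sl rfl).1 (by omega)
            rw [hin, ← he, ih (b + 1) (some sl) (by intro sl' h; cases h; exact ⟨by have := (hp sl rfl).1; omega, (hp sl rfl).2⟩)]
            have htr : pvTruthy (some sl.2) = true := by
              have := (hp sl rfl).2
              simp [pvTruthy]; omega
            simp [hH, hT', htr, hle]
    · rw [Bool.not_eq_true] at hH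
      rw [regsFrom_nh titles l ls b p hH]
      cases p with
      | none =>
        have shape := regsFrom_shape titles ls (b + 1) (none : Option (Int × Int))
        simp only at shape
        rw [kept_cons]
        have hin : inReg (regsFrom titles ls (b + 1) none) b = false :=
          inReg_false_of_late _ b (fun r hr => by have := shape r hr; omega)
        rw [hin, ih (b + 1) (none : Option (Int × Int)) (by intro sl h; cases h)]
        simp [hH, pvTruthy]
      | some sl =>
        have shape := regsFrom_shape titles ls (b + 1) (some sl)
        simp only at shape
        obtain ⟨e, rest, he, hbe, hrest⟩ := shape
        rw [kept_cons, he]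
        have hin : inReg ((sl.1, e) :: rest) b = true :=
          inReg_true_of_head rest sl.1 e b (hp sl rfl).1 (by omega)
        rw [hin, ← he, ih (b + 1) (some sl) (by intro sl' h; cases h; exact ⟨by have := (hp sl rfl).1; omega, (hp sl rfl).2⟩)]
        have htr : pvTruthy (some sl.2) = true := by
          have := (hp sl rfl).2
          simp [pvTruthy]; omega
        simp [hH, htr]

-- ===== VERDICT (by name: the statement is the Claim_ definition above) =====
theorem remove_md_sections_spec : Claim_equal_remove_md_sections := by
  intro md titles _
  unfold Spec_remove_md_sections remove_md_sections remove_md_sections_alt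
  simp only []
  have hA := foldA_spec titles (PySem.Chars.splitlines md.toList) [] none
  rw [List.nil_append] at hA
  rw [hA]
  have hreg : (match ((pvHdrs ((PySem.Chars.splitlines md.toList).map pvClean) 0).foldl (pvRegStep titles) (([] : List (Int × Int)), (none : Option (Int × Int)))).2 with
      | some sl => ((pvHdrs ((PySem.Chars.splitlines md.toList).map pvClean) 0).foldl (pvRegStep titles) (([] : List (Int × Int)), (none : Option (Int × Int)))).1 ++ [(sl.1, (((PySem.Chars.splitlines md.toList).map pvClean).length : Int))]
      | none => ((pvHdrs ((PySem.Chars.splitlines md.toList).map pvClean) 0).foldl (pvRegStep titles) (([] : List (Int × Int)), (none : Option (Int × Int)))).1)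
      = regsFrom titles ((PySem.Chars.splitlines md.toList).map pvClean) 0 none := by
    unfold regsFrom
    cases hq : ((pvHdrs ((PySem.Chars.splitlines md.toList).map pvClean) 0).foldl (pvRegStep titles) (([] : List (Int × Int)), (none : Option (Int × Int)))).2 <;> simp [hq]
  rw [hreg, kept_spec titles ((PySem.Chars.splitlines md.toList).map pvClean) 0 none (by intro sl h; cases h)]
  rfl
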